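-- pv_equiv track=rewrite | github.com/harjeb/pazusoba | support/test_3x3_logic.py | is_3x3_square
-- ===== SOURCE A (Python) =====
-- def is_3x3_square(locations, column):
--     """Check if locations form a 3x3 square"""
--     if len(locations) != 9:
--         return False
--
--     # Find the minimum row and column to determine top-left corner
--     min_row = float('inf')
--     min_col = float('inf')
--
--     for loc in locations:
--         row = loc // column
--         col = loc % column
--         min_row = min(min_row, row)
--         min_col = min(min_col, col)
--
--     # Check if all 9 positions in the 3x3 square are present
--     for i in range(3):
--         for j in range(3):
--             expected_loc = (min_row + i) * column + (min_col + j)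
--             if expected_loc not in locations:
--                 return False
--
--     return True
-- ===== SOURCE B (Python) =====
-- def is_3x3_square(locations, column):
--     """Check if locations form a 3x3 square (bounding-box span check)."""
--     if len(locations) != 9:
--         return False
--     if len(set(locations)) != 9:
--         return False
--     rows = [loc // column for loc in locations]
--     cols = [loc % column for loc in locations]
--     return max(rows) - min(rows) == 2 and max(cols) - min(cols) == 2
-- ===== Notes on version B (the rewrite author's own statement) =====
-- stated objective: simpler
-- what changed: A generates the 9 expected cell values from the minimal row/column and probes each for membership in the list; B instead rejects duplicates with one set-size check and then tests that the bounding box of the row and column coordinates has span exactly 2 in both directions — no expected-cell generation and no membership probes.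
-- outside the precondition, e.g. on is_3x3_square([0, 1, 2, 3, 4, 0, 0, 0, 0], 1): A returns True, B returns False; on is_3x3_square([0, 1, 2, 3, 4, 5, 6, 7, 8], 2): A returns True, B returns False; on is_3x3_square([0, 1, 2, 3, 4, 5, 6, 7, 8], 0): A raises ZeroDivisionError, B raises ZeroDivisionError
import Mathlib
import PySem

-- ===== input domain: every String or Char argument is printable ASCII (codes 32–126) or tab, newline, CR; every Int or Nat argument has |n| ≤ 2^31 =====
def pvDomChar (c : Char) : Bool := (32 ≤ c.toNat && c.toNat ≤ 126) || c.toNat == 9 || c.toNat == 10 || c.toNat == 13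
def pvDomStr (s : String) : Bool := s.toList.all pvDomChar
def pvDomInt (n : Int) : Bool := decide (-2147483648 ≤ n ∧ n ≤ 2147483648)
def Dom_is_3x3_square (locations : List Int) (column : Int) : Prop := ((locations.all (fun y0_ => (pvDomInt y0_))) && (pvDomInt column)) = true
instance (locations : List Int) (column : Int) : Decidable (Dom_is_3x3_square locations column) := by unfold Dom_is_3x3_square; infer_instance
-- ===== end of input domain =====

-- B replaces A's generate-the-9-expected-cells-and-probe-membership with a duplicate check
-- plus a bounding-box span test on the row/column coordinates (objective: simpler).


-- ===== PORT A =====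
-- the running `min_row = min(min_row, row); min_col = min(min_col, col)` loop;
-- `none` plays float('inf'): the first element replaces it
def pvMinStep (column : Int) (st : Option Int × Option Int) (loc : Int) : Option Int × Option Int :=
  let row := PySem.Int.floordiv loc column
  let col := PySem.Int.mod loc column
  (some (match st.1 with | none => row | some m => min m row),
   some (match st.2 with | none => col | some m => min m col))

def is_3x3_square (locations : List Int) (column : Int) : Bool :=
  if locations.length ≠ 9 then false
  else
    match locations.foldl (pvMinStep column) (none, none) with
    | (some min_row, some min_col) =>
        (PySem.List.pyRange 0 3 1).all fun i =>
          (PySem.List.pyRange 0 3 1).all fun j =>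
            decide ((min_row + i) * column + (min_col + j) ∈ locations)
    | _ => false   -- unreachable under the length guard (min_row/min_col still inf in Python → first probe fails → False)

-- ===== PORT B =====
def is_3x3_square_alt (locations : List Int) (column : Int) : Bool :=
  if locations.length ≠ 9 then false
  else if (PySem.Set.ofList locations).length ≠ 9 then false
  else
    let rows := locations.map fun loc => PySem.Int.floordiv loc column
    let cols := locations.map fun loc => PySem.Int.mod loc column
    match PySem.List.max? rows (fun y => y) with
    | none => false   -- unreachable: the list is nonempty under the length guard
    | some rmax =>
      match PySem.List.min? rows (fun y => y) with
      | none => false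
      | some rmin =>
        match PySem.List.max? cols (fun y => y) with
        | none => false
        | some cmax =>
          match PySem.List.min? cols (fun y => y) with
          | none => false
          | some cmin => decide (rmax - rmin = 2) && decide (cmax - cmin = 2)

-- ===== PRECONDITION & SPEC =====
-- Pre_ excludes inputs with exactly 9 locations and |column| < 3: for column = 0 A raises
-- ZeroDivisionError, and for the degenerate board widths 1, 2 (and their negatives) a 3x3 square
-- cannot exist at all, yet A's nine expected cell values collide there and its membership probe can
-- answer True (e.g. on duplicate-laden lists) — a corner no caller specifies; B answers False there.
def Pre_is_3x3_square (locations : List Int) (column : Int) : Prop :=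
  locations.length = 9 → (3 ≤ column ∨ column ≤ -3)
instance (locations : List Int) (column : Int) : Decidable (Pre_is_3x3_square locations column) := by unfold Pre_is_3x3_square; infer_instance

def pvWitness_is_3x3_square : List Int × Int := ([0, 1, 2, 3, 4, 5, 6, 7, 8], 3)

def Spec_is_3x3_square (locations : List Int) (column : Int) (out : Bool) : Prop := out = is_3x3_square_alt locations column
instance (locations : List Int) (column : Int) (out : Bool) : Decidable (Spec_is_3x3_square locations column out) := by unfold Spec_is_3x3_square; infer_instance

-- ===== CLAIM (what is proved, stated in full; the proofs are below) =====
def Claim_equal_is_3x3_square : Prop := ∀ (locations : List Int) (column : Int), Dom_is_3x3_square locations column → Pre_is_3x3_square locations column → Spec_is_3x3_square locations column (is_3x3_square locations column)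

-- ===== LEMMAS AND PROOFS =====

-- the value range of Python's `%` with divisor c: [0, c) for c > 0, (c, 0] for c < 0
def pvStrip (c r : Int) : Prop := (0 ≤ r ∧ r < c) ∨ (c < r ∧ r ≤ 0)

lemma pvStrip_mod (c x : Int) (hc : c ≠ 0) : pvStrip c (PySem.Int.mod x c) := by
  rcases lt_or_gt_of_ne hc with h | h
  · exact Or.inr ⟨(PySem.Int.mod_neg_bounds x h).1, (PySem.Int.mod_neg_bounds x h).2⟩
  · exact Or.inl ⟨PySem.Int.mod_nonneg x h, PySem.Int.mod_lt x h⟩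

lemma pvDivmodUnique (c q₁ r₁ q₂ r₂ : Int) (hc : c ≠ 0)
    (h₁ : pvStrip c r₁) (h₂ : pvStrip c r₂)
    (he : q₁ * c + r₁ = q₂ * c + r₂) : q₁ = q₂ ∧ r₁ = r₂ := by
  have hd : c ∣ (r₁ - r₂) := ⟨q₂ - q₁, by ring_nf; linarith⟩
  have hr : r₁ - r₂ = 0 := by
    refine Int.eq_zero_of_dvd_of_natAbs_lt_natAbs hd ?_
    unfold pvStrip at h₁ h₂
    omega
  have hq : q₁ * c = q₂ * c := by linarith
  exact ⟨mul_right_cancel₀ hc hq, by omega⟩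

-- characterization of A's running fold
lemma pvMinStep_foldl (c : Int) (xs : List Int) (a b : Int) :
    xs.foldl (pvMinStep c) (some a, some b) =
      (some (List.foldl min a (xs.map fun v => PySem.Int.floordiv v c)),
       some (List.foldl min b (xs.map fun v => PySem.Int.mod v c))) := by
  induction xs generalizing a b with
  | nil => simp
  | cons y ys ih => simp [pvMinStep, ih]

lemma pvSetLen (l : List Int) : (PySem.Set.ofList l).length = l.toFinset.card := by
  rw [← List.toFinset_card_of_nodup (PySem.Set.nodup_ofList l)]
  congr 1
  ext v
  simp [PySem.Set.mem_ofList]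

lemma pvCardNodup (l : List Int) (h : l.toFinset.card = l.length) : l.Nodup := by
  rw [List.card_toFinset] at h
  have h2 := (List.dedup_sublist l).eq_of_length h
  rw [← List.dedup_eq_self]; exact h2

-- the mathematical core: for |c| ≥ 3 and 9 locations, A's expected-cell membership test
-- is equivalent to (no duplicates ∧ row span = 2 ∧ column span = 2)
lemma pvCore (l : List Int) (c mr Mr mc Mc : Int)
    (hc : 3 ≤ c ∨ c ≤ -3) (hl : l.length = 9)
    (hmr1 : ∀ v ∈ l, mr ≤ PySem.Int.floordiv v c)
    (hMr1 : ∀ v ∈ l, PySem.Int.floordiv v c ≤ Mr)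
    (hMr2 : Mr ∈ l.map (fun v => PySem.Int.floordiv v c))
    (hmc1 : ∀ v ∈ l, mc ≤ PySem.Int.mod v c)
    (hmc2 : mc ∈ l.map (fun v => PySem.Int.mod v c))
    (hMc1 : ∀ v ∈ l, PySem.Int.mod v c ≤ Mc)
    (hMc2 : Mc ∈ l.map (fun v => PySem.Int.mod v c)) :
    ((∀ i j : Int, 0 ≤ i → i ≤ 2 → 0 ≤ j → j ≤ 2 → (mr + i) * c + (mc + j) ∈ l)
      ↔ (l.Nodup ∧ Mr - mr = 2 ∧ Mc - mc = 2)) := by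
  have hc0 : c ≠ 0 := by omega
  have recon : ∀ v : Int, PySem.Int.floordiv v c * c + PySem.Int.mod v c = v :=
    fun v => PySem.Int.floordiv_mul_add_mod v c
  obtain ⟨vmc, hvmc, hvmceq⟩ := List.mem_map.mp hmc2
  have mc_strip : pvStrip c mc := hvmceq ▸ pvStrip_mod c vmc hc0
  constructor
  · intro hA
    have hstrip2 : pvStrip c (mc + 2) := by
      by_contra hno
      have hy : (mr + 0) * c + (mc + 2) ∈ l := hA 0 2 le_rfl (by norm_num) (by norm_num) le_rfl
      rcases hc with hcp | hcn
      · have he : PySem.Int.floordiv ((mr + 0) * c + (mc + 2)) c * c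
              + PySem.Int.mod ((mr + 0) * c + (mc + 2)) c = (mr + 1) * c + (mc + 2 - c) := by
          rw [recon]; ring
        have hu := pvDivmodUnique c _ _ (mr + 1) (mc + 2 - c) hc0
          (pvStrip_mod c _ hc0)
          (Or.inl ⟨by unfold pvStrip at mc_strip hno; omega, by unfold pvStrip at mc_strip hno; omega⟩) he
        have := hmc1 _ hy
        unfold pvStrip at mc_strip hno
        omega
      · have he : PySem.Int.floordiv ((mr + 0) * c + (mc + 2)) c * c
              + PySem.Int.mod ((mr + 0) * c + (mc + 2)) c = (mr - 1) * c + (mc + 2 + c) := by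
          rw [recon]; ring
        have hu := pvDivmodUnique c _ _ (mr - 1) (mc + 2 + c) hc0
          (pvStrip_mod c _ hc0)
          (Or.inr ⟨by unfold pvStrip at mc_strip hno; omega, by unfold pvStrip at mc_strip hno; omega⟩) he
        have := hmc1 _ hy
        unfold pvStrip at mc_strip hno
        omega
    have hstripj : ∀ j : Int, 0 ≤ j → j ≤ 2 → pvStrip c (mc + j) := by
      intro j h1 h2; unfold pvStrip at mc_strip hstrip2 ⊢; omega
    -- the 9 expected cells as a finset
    set f : Int × Int → Int := fun p => (mr + p.1) * c + (mc + p.2) with hf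
    set E : Finset Int := ((Finset.Ico (0:ℤ) 3) ×ˢ (Finset.Ico (0:ℤ) 3)).image f with hE
    have hinj : Set.InjOn f ↑((Finset.Ico (0:ℤ) 3) ×ˢ (Finset.Ico (0:ℤ) 3)) := by
      intro p hp q hq hpq
      simp only [Finset.coe_product, Set.mem_prod, Finset.mem_coe, Finset.mem_Ico] at hp hq
      have hu := pvDivmodUnique c (mr + p.1) (mc + p.2) (mr + q.1) (mc + q.2) hc0
        (hstripj p.2 hp.2.1 (by omega)) (hstripj q.2 hq.2.1 (by omega)) hpq
      have : p.1 = q.1 := by omega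
      have : p.2 = q.2 := by omega
      exact Prod.ext (by omega) (by omega)
    have hEsub : E ⊆ l.toFinset := by
      intro v hv
      rw [hE, Finset.mem_image] at hv
      obtain ⟨p, hp, rfl⟩ := hv
      rw [Finset.mem_product, Finset.mem_Ico, Finset.mem_Ico] at hp
      exact List.mem_toFinset.mpr (hA p.1 p.2 hp.1.1 (by omega) hp.2.1 (by omega))
    have hEcard : E.card = 9 := by
      rw [hE, Finset.card_image_of_injOn hinj, Finset.card_product, Int.card_Ico]
      rfl
    have h9 : l.toFinset.card = 9 := by
      have h1 := List.toFinset_card_le l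
      have h2 := Finset.card_le_card hEsub
      omega
    have hnd : l.Nodup := by
      apply pvCardNodup
      omega
    have hET : E = l.toFinset := Finset.eq_of_subset_of_card_le hEsub (by omega)
    have shape : ∀ v ∈ l, ∃ i j : Int, 0 ≤ i ∧ i ≤ 2 ∧ 0 ≤ j ∧ j ≤ 2 ∧
        PySem.Int.floordiv v c = mr + i ∧ PySem.Int.mod v c = mc + j := by
      intro v hv
      have : v ∈ E := by rw [hET]; exact List.mem_toFinset.mpr hv
      rw [hE, Finset.mem_image] at this
      obtain ⟨p, hp, hpv⟩ := this
      rw [Finset.mem_product, Finset.mem_Ico, Finset.mem_Ico] at hp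
      have he : PySem.Int.floordiv v c * c + PySem.Int.mod v c = (mr + p.1) * c + (mc + p.2) := by
        rw [recon]; exact hpv.symm
      have hu := pvDivmodUnique c _ _ (mr + p.1) (mc + p.2) hc0
        (pvStrip_mod c v hc0) (hstripj p.2 hp.2.1 (by omega)) he
      exact ⟨p.1, p.2, hp.1.1, by omega, hp.2.1, by omega, hu.1, hu.2⟩
    refine ⟨hnd, ?_, ?_⟩
    · obtain ⟨v0, hv0, hv0eq⟩ := List.mem_map.mp hMr2
      obtain ⟨i, j, _, hi2, _, _, hfd, _⟩ := shape v0 hv0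
      have hy : (mr + 2) * c + (mc + 0) ∈ l := hA 2 0 (by norm_num) le_rfl le_rfl (by norm_num)
      have he : PySem.Int.floordiv ((mr + 2) * c + (mc + 0)) c * c
            + PySem.Int.mod ((mr + 2) * c + (mc + 0)) c = (mr + 2) * c + (mc + 0) := recon _
      have hu := pvDivmodUnique c _ _ (mr + 2) (mc + 0) hc0
        (pvStrip_mod c _ hc0) (hstripj 0 le_rfl (by norm_num)) he
      have := hMr1 _ hy
      omega
    · obtain ⟨v0, hv0, hv0eq⟩ := List.mem_map.mp hMc2
      obtain ⟨i, j, _, _, _, hj2, _, hfm⟩ := shape v0 hv0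
      have hy : (mr + 0) * c + (mc + 2) ∈ l := hA 0 2 le_rfl (by norm_num) (by norm_num) le_rfl
      have he : PySem.Int.floordiv ((mr + 0) * c + (mc + 2)) c * c
            + PySem.Int.mod ((mr + 0) * c + (mc + 2)) c = (mr + 0) * c + (mc + 2) := recon _
      have hu := pvDivmodUnique c _ _ (mr + 0) (mc + 2) hc0
        (pvStrip_mod c _ hc0) hstrip2 he
      have := hMc1 _ hy
      omega
  · rintro ⟨hnd, hMrs, hMcs⟩ i j hi1 hi2 hj1 hj2
    have hb : ∀ v ∈ l, mr ≤ PySem.Int.floordiv v c ∧ PySem.Int.floordiv v c ≤ mr + 2 ∧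
        mc ≤ PySem.Int.mod v c ∧ PySem.Int.mod v c ≤ mc + 2 := by
      intro v hv
      have h1 := hmr1 v hv; have h2 := hMr1 v hv
      have h3 := hmc1 v hv; have h4 := hMc1 v hv
      omega
    set g : Int → Int := fun v => (PySem.Int.floordiv v c - mr) * 3 + (PySem.Int.mod v c - mc) with hg
    have himg : l.toFinset.image g ⊆ Finset.Ico (0:ℤ) 9 := by
      intro k hk
      rw [Finset.mem_image] at hk
      obtain ⟨v, hv, rfl⟩ := hk
      have := hb v (List.mem_toFinset.mp hv)
      rw [Finset.mem_Ico]
      simp only [hg]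
      omega
    have hinj : Set.InjOn g ↑l.toFinset := by
      intro v hv w hw hvw
      have hbv := hb v (List.mem_toFinset.mp hv)
      have hbw := hb w (List.mem_toFinset.mp hw)
      simp only [hg] at hvw
      have h1 : PySem.Int.floordiv v c = PySem.Int.floordiv w c := by omega
      have h2 : PySem.Int.mod v c = PySem.Int.mod w c := by omega
      calc v = PySem.Int.floordiv v c * c + PySem.Int.mod v c := (recon v).symm
        _ = PySem.Int.floordiv w c * c + PySem.Int.mod w c := by rw [h1, h2]
        _ = w := recon w
    have hcard : (l.toFinset.image g).card = 9 := by
      rw [Finset.card_image_of_injOn hinj, List.toFinset_card_of_nodup hnd, hl]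
    have heq : l.toFinset.image g = Finset.Ico (0:ℤ) 9 := by
      refine Finset.eq_of_subset_of_card_le himg ?_
      rw [hcard, Int.card_Ico]
      rfl
    have hk : (i * 3 + j) ∈ Finset.Ico (0:ℤ) 9 := by rw [Finset.mem_Ico]; omega
    rw [← heq, Finset.mem_image] at hk
    obtain ⟨v, hv, hgv⟩ := hk
    have hvl := List.mem_toFinset.mp hv
    have hbv := hb v hvl
    simp only [hg] at hgv
    have h1 : PySem.Int.floordiv v c = mr + i := by omega
    have h2 : PySem.Int.mod v c = mc + j := by omega
    have : (mr + i) * c + (mc + j) = v := by rw [← h1, ← h2]; exact recon v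
    rwa [this]

-- ===== VERDICT (by name: the statement is the Claim_ definition above) =====
lemma pvRange3 : PySem.List.pyRange 0 3 1 = [0, 1, 2] := by decide

theorem is_3x3_square_spec : Claim_equal_is_3x3_square := by
  unfold Claim_equal_is_3x3_square
  intro l c _ hpre
  unfold Spec_is_3x3_square
  by_cases hl : l.length = 9
  case neg => unfold is_3x3_square is_3x3_square_alt; rw [if_pos hl, if_pos hl]
  have hc : 3 ≤ c ∨ c ≤ -3 := hpre hl
  obtain ⟨x, xs, rfl⟩ : ∃ x xs, l = x :: xs := by
    cases l with
    | nil => simp at hl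
    | cons a b => exact ⟨a, b, rfl⟩
  -- the four extrema both ports compute
  set MR : Int := List.foldl min (PySem.Int.floordiv x c) (xs.map fun v => PySem.Int.floordiv v c) with hMRdef
  set Mr : Int := List.foldl max (PySem.Int.floordiv x c) (xs.map fun v => PySem.Int.floordiv v c) with hMrdef
  set MC : Int := List.foldl min (PySem.Int.mod x c) (xs.map fun v => PySem.Int.mod v c) with hMCdef
  set Mc : Int := List.foldl max (PySem.Int.mod x c) (xs.map fun v => PySem.Int.mod v c) with hMcdef
  have hminr : PySem.List.min? ((x :: xs).map fun v => PySem.Int.floordiv v c) (fun y => y) = some MR := by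
    rw [List.map_cons]; exact PySem.List.min?_id_cons _ _
  have hmaxr : PySem.List.max? ((x :: xs).map fun v => PySem.Int.floordiv v c) (fun y => y) = some Mr := by
    rw [List.map_cons]; exact PySem.List.max?_id_cons _ _
  have hminc : PySem.List.min? ((x :: xs).map fun v => PySem.Int.mod v c) (fun y => y) = some MC := by
    rw [List.map_cons]; exact PySem.List.min?_id_cons _ _
  have hmaxc : PySem.List.max? ((x :: xs).map fun v => PySem.Int.mod v c) (fun y => y) = some Mc := by
    rw [List.map_cons]; exact PySem.List.max?_id_cons _ _
  have hmr1 : ∀ v ∈ (x :: xs), MR ≤ PySem.Int.floordiv v c := fun v hv =>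
    PySem.List.min?_isMin hminr _ (List.mem_map_of_mem hv)
  have hMr1 : ∀ v ∈ (x :: xs), PySem.Int.floordiv v c ≤ Mr := fun v hv =>
    PySem.List.max?_isMax hmaxr _ (List.mem_map_of_mem hv)
  have hMr2 : Mr ∈ (x :: xs).map (fun v => PySem.Int.floordiv v c) := PySem.List.max?_mem hmaxr
  have hmc1 : ∀ v ∈ (x :: xs), MC ≤ PySem.Int.mod v c := fun v hv =>
    PySem.List.min?_isMin hminc _ (List.mem_map_of_mem hv)
  have hmc2 : MC ∈ (x :: xs).map (fun v => PySem.Int.mod v c) := PySem.List.min?_mem hminc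
  have hMc1 : ∀ v ∈ (x :: xs), PySem.Int.mod v c ≤ Mc := fun v hv =>
    PySem.List.max?_isMax hmaxc _ (List.mem_map_of_mem hv)
  have hMc2 : Mc ∈ (x :: xs).map (fun v => PySem.Int.mod v c) := PySem.List.max?_mem hmaxc
  have hiff := pvCore (x :: xs) c MR Mr MC Mc hc hl hmr1 hMr1 hMr2 hmc1 hmc2 hMc1 hMc2
  -- A's running fold produces exactly (MR, MC)
  have hfold : (x :: xs).foldl (pvMinStep c) (none, none) = (some MR, some MC) := by
    rw [List.foldl_cons]
    have h1 : pvMinStep c (none, none) x = (some (PySem.Int.floordiv x c), some (PySem.Int.mod x c)) := rfl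
    rw [h1, pvMinStep_foldl, hMRdef, hMCdef]
  have hguard : ¬((x :: xs).length ≠ 9) := by simp [hl]
  have hAiff : (is_3x3_square (x :: xs) c = true) ↔
      ((x :: xs).Nodup ∧ Mr - MR = 2 ∧ Mc - MC = 2) := by
    rw [← hiff]
    unfold is_3x3_square
    rw [if_neg hguard, hfold]
    simp only [pvRange3, List.all_cons, List.all_nil, Bool.and_eq_true, decide_eq_true_eq, and_true]
    constructor
    · rintro ⟨⟨h00, h01, h02⟩, ⟨h10, h11, h12⟩, ⟨h20, h21, h22⟩⟩ i j hi0 hi2 hj0 hj2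
      have hi : i = 0 ∨ i = 1 ∨ i = 2 := by omega
      have hj : j = 0 ∨ j = 1 ∨ j = 2 := by omega
      rcases hi with rfl | rfl | rfl <;> rcases hj with rfl | rfl | rfl <;> assumption
    · intro h
      refine ⟨⟨?_, ?_, ?_⟩, ⟨?_, ?_, ?_⟩, ⟨?_, ?_, ?_⟩⟩ <;> exact h _ _ (by norm_num) (by norm_num) (by norm_num) (by norm_num)
  have hBiff : (is_3x3_square_alt (x :: xs) c = true) ↔
      ((x :: xs).Nodup ∧ Mr - MR = 2 ∧ Mc - MC = 2) := by
    unfold is_3x3_square_alt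
    rw [if_neg hguard]
    by_cases hnd : (x :: xs).Nodup
    · have hset : (PySem.Set.ofList (x :: xs)).length = 9 := by
        rw [pvSetLen, List.toFinset_card_of_nodup hnd, hl]
      rw [if_neg (by simp [hset])]
      simp only [hmaxr, hminr, hmaxc, hminc, Bool.and_eq_true, decide_eq_true_eq]
      exact ⟨fun ⟨h1, h2⟩ => ⟨hnd, h1, h2⟩, fun ⟨_, h1, h2⟩ => ⟨h1, h2⟩⟩
    · have hset : (PySem.Set.ofList (x :: xs)).length ≠ 9 := by
        intro h
        exact hnd (pvCardNodup _ (by rw [← pvSetLen, h, hl]))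
      rw [if_pos hset]
      simp only [Bool.false_eq_true, false_iff]
      exact fun h => hnd h.1
  rw [Bool.eq_iff_iff, hAiff, hBiff]
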